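-- pv_equiv track=rewrite | github.com/Rvdhanush/indic_codeswitched_asr | analysis/report.py | shared_failures
-- ===== SOURCE A (Python) =====
-- def shared_failures(all_results: dict) -> list[str]:
--     """
--     Return failure categories where all models rank it in their top-2.
--     These represent systemic weaknesses across architectures.
--     """
--     top2_per_model = []
--     for r in all_results.values():
--         bd = r.get("failure_breakdown", {})
--         if not bd:
--             continue
--         sorted_cats = sorted(bd, key=bd.get, reverse=True)
--         top2_per_model.append(set(sorted_cats[:2]))
--
--     if not top2_per_model:
--         return []
--     shared = top2_per_model[0]
--     for s in top2_per_model[1:]: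
--         shared = shared & s
--     return sorted(shared)
-- ===== SOURCE B (Python) =====
-- def shared_failures(all_results: dict) -> list[str]:
--     """
--     Return failure categories where all models rank it in their top-2.
--     Count-and-threshold: tally each model's top-2 categories in a frequency
--     table and keep the categories seen by every qualifying model.
--     """
--     n = 0
--     counts = {}
--     for r in all_results.values():
--         bd = r.get("failure_breakdown", {})
--         if not bd:
--             continue
--         n += 1
--         for cat in sorted(bd, key=bd.get, reverse=True)[:2]:
--             counts[cat] = counts.get(cat, 0) + 1
--     return sorted(cat for cat, c in counts.items() if c == n)
-- ===== Notes on version B (the rewrite author's own statement) =====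
-- stated objective: alternative
-- what changed: Replaces the iterated pairwise set-intersection over per-model top-2 sets with a single count-and-threshold pass: tally top-2 categories of each qualifying model in a frequency dict, count qualifying models n, and keep categories whose tally equals n.
import Mathlib
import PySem

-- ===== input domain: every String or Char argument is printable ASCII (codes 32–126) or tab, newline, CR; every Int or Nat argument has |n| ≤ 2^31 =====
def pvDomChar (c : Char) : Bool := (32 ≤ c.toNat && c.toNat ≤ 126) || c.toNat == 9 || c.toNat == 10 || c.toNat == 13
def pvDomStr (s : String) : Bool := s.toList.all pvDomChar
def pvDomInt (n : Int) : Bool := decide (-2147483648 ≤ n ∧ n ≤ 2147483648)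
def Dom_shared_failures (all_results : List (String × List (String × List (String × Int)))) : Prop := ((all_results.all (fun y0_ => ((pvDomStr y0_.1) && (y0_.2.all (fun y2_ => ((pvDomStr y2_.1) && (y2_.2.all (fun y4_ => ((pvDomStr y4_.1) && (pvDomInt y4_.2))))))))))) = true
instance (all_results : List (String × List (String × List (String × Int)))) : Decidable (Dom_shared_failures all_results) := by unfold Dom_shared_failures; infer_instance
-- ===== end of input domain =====

-- One honest line: B replaces the iterated set-intersection of per-model top-2
-- sets with a count-and-threshold pass over a frequency table (same top-2 step).

-- ===== PORT A =====
-- the breakdown dict of one model's result r (shared phrasing of r.get("failure_breakdown", {}))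
def pvBd (r : List (String × List (String × Int))) : PySem.Dict String Int :=
  PySem.Dict.ofList ((PySem.Dict.ofList r).getD "failure_breakdown" [])

-- sorted(bd, key=bd.get, reverse=True)[:2]  (bd.get k = its value for every key k of bd, so getD k 0 is exact here)
def pvTop2 (bd : PySem.Dict String Int) : List String :=
  PySem.List.slice (PySem.List.sorted bd.keys (fun k => bd.getD k 0) true) none (some 2)

def shared_failures (all_results : List (String × List (String × List (String × Int)))) : List String :=
  let top2_per_model : List (PySem.Set String) :=
    (PySem.Dict.ofList all_results).values.foldl (fun acc r =>
      let bd := pvBd r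
      if bd.items = [] then acc
      else acc ++ [PySem.Set.ofList (pvTop2 bd)]) []
  match top2_per_model with
  | [] => []
  | shared0 :: rest =>
      PySem.List.sorted (rest.foldl (fun shared s => PySem.Set.inter shared s) shared0) (fun x => x) false

-- ===== PORT B =====
def shared_failures_alt (all_results : List (String × List (String × List (String × Int)))) : List String :=
  let st : Int × PySem.Dict String Int :=
    (PySem.Dict.ofList all_results).values.foldl (fun st r =>
      let bd := pvBd r
      if bd.items = [] then st
      else
        (st.1 + 1,
         (pvTop2 bd).foldl (fun counts cat => counts.insert cat (counts.getD cat 0 + 1)) st.2)) (0, PySem.Dict.empty)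
  PySem.List.sorted ((st.2.items.filter (fun p => p.2 == st.1)).map (·.1)) (fun x => x) false

-- ===== PRECONDITION & SPEC =====
def Spec_shared_failures (all_results : List (String × List (String × List (String × Int)))) (out : List String) : Prop := out = shared_failures_alt all_results
instance (all_results : List (String × List (String × List (String × Int)))) (out : List String) : Decidable (Spec_shared_failures all_results out) := by unfold Spec_shared_failures; infer_instance

-- ===== CLAIM (what is proved, stated in full; the proofs are below) =====
def Claim_equal_shared_failures : Prop := ∀ (all_results : List (String × List (String × List (String × Int)))), Dom_shared_failures all_results → Spec_shared_failures all_results (shared_failures all_results)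


-- ===== LEMMAS AND PROOFS =====

-- the list of qualifying models' top-2 category lists, in model order
def pvL (vs : List (List (String × List (String × Int)))) : List (List String) :=
  vs.filterMap (fun r => if (pvBd r).items = [] then none else some (pvTop2 (pvBd r)))

theorem pvTop2_nodup (r : List (String × List (String × Int))) : (pvTop2 (pvBd r)).Nodup := by
  rw [pvTop2, PySem.List.slice_to _ (by norm_num)]
  exact List.Nodup.sublist (List.take_sublist _ _)
    ((PySem.List.sorted_perm _ _ _).nodup_iff.mpr (PySem.Dict.nodup_keys_ofList _))

theorem pvL_nodup (vs : List (List (String × List (String × Int)))) :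
    ∀ l ∈ pvL vs, l.Nodup := by
  intro l hl
  simp only [pvL, List.mem_filterMap] at hl
  obtain ⟨r, _, hr⟩ := hl
  split at hr
  · exact absurd hr (by simp)
  · cases hr; exact pvTop2_nodup r

theorem foldA (vs : List (List (String × List (String × Int)))) :
    ∀ acc, vs.foldl (fun acc r =>
        if (pvBd r).items = [] then acc
        else acc ++ [PySem.Set.ofList (pvTop2 (pvBd r))]) acc
      = acc ++ (pvL vs).map PySem.Set.ofList := by
  induction vs with
  | nil => intro acc; simp [pvL]
  | cons r vs ih =>
      intro acc
      simp only [List.foldl_cons, pvL, List.filterMap_cons]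
      by_cases h : (pvBd r).items = []
      · simp [h, ih acc, pvL]
      · simp only [if_neg h, ih, pvL, List.map_cons, List.append_assoc, List.singleton_append]

theorem foldB (vs : List (List (String × List (String × Int)))) :
    ∀ (st : Int × PySem.Dict String Int), vs.foldl (fun st r =>
        if (pvBd r).items = [] then st
        else (st.1 + 1,
          (pvTop2 (pvBd r)).foldl (fun counts cat => counts.insert cat (counts.getD cat 0 + 1)) st.2)) st
      = (st.1 + ((pvL vs).length : Int),
         (pvL vs).flatten.foldl (fun counts cat => counts.insert cat (counts.getD cat 0 + 1)) st.2) := by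
  induction vs with
  | nil => intro st; simp [pvL]
  | cons r vs ih =>
      intro st
      simp only [List.foldl_cons, pvL, List.filterMap_cons]
      by_cases h : (pvBd r).items = []
      · simp [h, ih st, pvL]
      · simp only [if_neg h, ih, pvL, List.length_cons, List.flatten_cons, List.foldl_append]
        refine Prod.ext ?_ rfl
        push_cast
        ring

theorem mem_foldl_inter (rest : List (PySem.Set String)) :
    ∀ (s : PySem.Set String) (x : String), x ∈ rest.foldl (fun shared t => PySem.Set.inter shared t) s ↔
      x ∈ s ∧ ∀ t ∈ rest, x ∈ t := by
  induction rest with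
  | nil => intro s x; simp
  | cons u rest ih =>
      intro s x
      simp only [List.foldl_cons, ih, PySem.Set.mem_inter, List.mem_cons]
      constructor
      · rintro ⟨⟨hs, hu⟩, h⟩
        exact ⟨hs, fun t ht => ht.elim (fun e => e ▸ hu) (h t)⟩
      · rintro ⟨hs, h⟩
        exact ⟨⟨hs, h u (Or.inl rfl)⟩, fun t ht => h t (Or.inr ht)⟩

theorem nodup_foldl_inter (rest : List (PySem.Set String)) :
    ∀ (s : PySem.Set String), s.Nodup → (rest.foldl (fun shared t => PySem.Set.inter shared t) s).Nodup := by
  induction rest with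
  | nil => intro s hs; exact hs
  | cons u rest ih => intro s hs; exact ih _ (PySem.Set.nodup_inter _ u hs)

theorem count_flatten (L : List (List String)) (h : ∀ l ∈ L, l.Nodup) (x : String) :
    L.flatten.count x = L.countP (fun l => decide (x ∈ l)) := by
  induction L with
  | nil => simp
  | cons l L ih =>
      simp only [List.flatten_cons, List.count_append, List.countP_cons,
        ih (fun l hl => h l (List.mem_cons_of_mem _ hl))]
      by_cases hx : x ∈ l
      · rw [List.count_eq_one_of_mem (h l (List.mem_cons_self ..)) hx]
        simp [hx]; omega
      · rw [List.count_eq_zero_of_not_mem hx]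
        simp [hx]

-- ===== VERDICT (by name: the statement is the Claim_ definition above) =====
theorem shared_failures_spec : Claim_equal_shared_failures := by
  intro all_results _
  simp only [Spec_shared_failures, shared_failures, shared_failures_alt]
  rw [foldA, foldB]
  simp only [List.nil_append, zero_add]
  rw [PySem.Dict.foldl_insert_getD_add_one_eq_counter]
  cases hL : pvL (PySem.Dict.ofList all_results).values with
  | nil =>
      simp [PySem.Dict.counter, PySem.Dict.empty, PySem.List.sorted]
  | cons l0 L' =>
      have hnd : ∀ l ∈ l0 :: L', l.Nodup := hL ▸ pvL_nodup _
      simp only [List.map_cons, PySem.Dict.items_counter, List.filter_map, List.map_map]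
      rw [PySem.List.sorted_id_eq_sorted_id_iff_perm]
      apply (List.perm_ext_iff_of_nodup
        (nodup_foldl_inter _ _ (PySem.Set.nodup_ofList _))
        (List.Nodup.map (fun a b h => h) ((PySem.Set.nodup_ofList _).filter _))).mpr
      intro x
      rw [mem_foldl_inter]
      constructor
      · rintro ⟨hx0, hx⟩
        have hall : ∀ l ∈ l0 :: L', x ∈ l := by
          intro l hl
          rcases List.mem_cons.mp hl with rfl | hl
          · exact (PySem.Set.mem_ofList _ _).mp hx0
          · exact (PySem.Set.mem_ofList _ _).mp (hx _ (List.mem_map_of_mem hl))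
        have hcnt : (l0 :: L').flatten.count x = (l0 :: L').length := by
          rw [count_flatten _ hnd, List.countP_eq_length.mpr]
          intro l hl; exact decide_eq_true (hall l hl)
        refine List.mem_map.mpr ⟨x, List.mem_filter.mpr ⟨(PySem.Set.mem_ofList _ _).mpr ?_, ?_⟩, rfl⟩
        · exact List.mem_flatten.mpr ⟨l0, List.mem_cons_self .., hall l0 (List.mem_cons_self ..)⟩
        · simp only [Function.comp, beq_iff_eq]
          exact_mod_cast hcnt
      · intro hx
        obtain ⟨y, hy, rfl⟩ := List.mem_map.mp hx
        obtain ⟨hymem, hyc⟩ := List.mem_filter.mp hy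
        simp only [Function.comp, beq_iff_eq] at hyc
        have hcnt : (l0 :: L').flatten.count y = (l0 :: L').length := by exact_mod_cast hyc
        have hall : ∀ l ∈ l0 :: L', y ∈ l := by
          have := List.countP_eq_length.mp (by rw [← count_flatten _ hnd]; exact hcnt)
          intro l hl; exact of_decide_eq_true (this l hl)
        refine ⟨(PySem.Set.mem_ofList _ _).mpr (hall l0 (List.mem_cons_self ..)), ?_⟩
        intro t ht
        obtain ⟨l, hl, rfl⟩ := List.mem_map.mp ht
        exact (PySem.Set.mem_ofList _ _).mpr (hall l (List.mem_cons_of_mem _ hl))
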